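-- pv_equiv track=rewrite | github.com/bcov77/random_bcov_scripts | jhr_extract_interface3.py | get_ss_elements2
-- ===== SOURCE A (Python) =====
-- import itertools
--
-- def get_ss_elements2(dssp):
--     assert(dssp[0] == "x")
--     ss_elements = []
--
--     offset = 0
--     ilabel = -1
--     for label, group in itertools.groupby(dssp):
--         ilabel += 1
--         this_len = sum(1 for _ in group)
--         next_offset = offset + this_len
--
--         ss_elements.append( (label, offset, next_offset-1))
--
--         offset = next_offset
--     return ss_elements[1:]
-- ===== SOURCE B (Python) =====
-- def get_ss_elements2(dssp):
--     assert(dssp[0] == "x")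
--     n = len(dssp)
--     bounds = [0] + [i for i in range(1, n) if dssp[i] != dssp[i - 1]] + [n]
--     res = []
--     for j in range(len(bounds) - 1):
--         s = bounds[j]
--         res.append((dssp[s], s, bounds[j + 1] - 1))
--     return res[1:]
-- ===== Notes on version B (the rewrite author's own statement) =====
-- stated objective: alternative
-- what changed: Replaces the groupby run-accumulation (running offset updated per group) with a change-point boundary table [0]+changes+[n] followed by a pass pairing consecutive boundaries into segments.
import Mathlib
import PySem

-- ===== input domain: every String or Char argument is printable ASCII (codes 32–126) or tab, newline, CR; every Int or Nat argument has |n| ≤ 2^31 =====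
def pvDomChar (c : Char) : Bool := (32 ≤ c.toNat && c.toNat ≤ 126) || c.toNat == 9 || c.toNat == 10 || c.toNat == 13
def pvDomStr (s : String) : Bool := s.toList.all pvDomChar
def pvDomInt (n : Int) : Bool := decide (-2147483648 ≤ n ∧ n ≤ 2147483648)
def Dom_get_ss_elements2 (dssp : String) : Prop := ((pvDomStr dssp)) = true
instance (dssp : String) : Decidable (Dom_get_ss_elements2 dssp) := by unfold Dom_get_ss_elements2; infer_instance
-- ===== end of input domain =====

-- B replaces A's groupby run-accumulation by a change-point boundary table paired into segments
-- (alternative decomposition, same cost); return-value equivalence only is claimed (neither mutates).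

-- ===== PORT A =====
-- the groupby loop: one iteration per run; 'this_len' = run length, offsets accumulated
def aGroups (offset : Int) : List Char → List (String × Int × Int)
  | [] => []
  | c :: rest =>
    let run := rest.takeWhile (· == c)
    let thisLen : Int := (run.length : Int) + 1
    (String.mk [c], offset, offset + thisLen - 1) ::
      aGroups (offset + thisLen) (rest.dropWhile (· == c))
  termination_by l => l.length
  decreasing_by
    simp only [List.length_cons]
    exact Nat.lt_succ_of_le (List.length_dropWhile_le _ _)

def get_ss_elements2 (dssp : String) : List (String × Int × Int) :=
  match PySem.Str.pyGet? dssp 0 with            -- dssp[0]: IndexError on empty → excluded by Pre_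
  | some c =>
    if c = 'x' then (aGroups 0 dssp.toList).drop 1   -- ss_elements[1:] (slice with nonneg start = drop)
    else []                                          -- assert fails (AssertionError) → excluded by Pre_
  | none => []

-- ===== PORT B =====
-- bounds change-point comprehension: [i for i in range(1, n) if dssp[i] != dssp[i-1]]
-- (indices drawn from range(1,n) are in range, so getD is exact for dssp[i]/dssp[i-1])
def bChg (cs : List Char) : List Nat :=
  (List.range' 1 (cs.length - 1)).filter (fun i => cs.getD i ' ' != cs.getD (i - 1) ' ')

-- the pairing loop over consecutive boundary entries bounds[j], bounds[j+1]
def bPair (cs : List Char) : List Nat → List (String × Int × Int)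
  | s :: e :: rest =>
      (String.mk [cs.getD s ' '], (s : Int), (e : Int) - 1) :: bPair cs (e :: rest)
  | _ => []

def get_ss_elements2_alt (dssp : String) : List (String × Int × Int) :=
  match PySem.Str.pyGet? dssp 0 with
  | some c =>
    if c = 'x' then
      let cs := dssp.toList
      (bPair cs (0 :: (bChg cs ++ [cs.length]))).drop 1   -- res[1:]
    else []
  | none => []

-- ===== PRECONDITION & SPEC =====
-- Pre_ excludes exactly the inputs where A raises: the empty string (IndexError) and
-- strings whose first character is not 'x' (AssertionError).
def Pre_get_ss_elements2 (dssp : String) : Prop := dssp.toList.head? = some 'x'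
instance (dssp : String) : Decidable (Pre_get_ss_elements2 dssp) := by unfold Pre_get_ss_elements2; infer_instance
def pvWitness_get_ss_elements2 : String := "xxy"

def Spec_get_ss_elements2 (dssp : String) (out : List (String × Int × Int)) : Prop := out = get_ss_elements2_alt dssp
instance (dssp : String) (out : List (String × Int × Int)) : Decidable (Spec_get_ss_elements2 dssp out) := by unfold Spec_get_ss_elements2; infer_instance

-- ===== CLAIM (what is proved, stated in full; the proofs are below) =====
def Claim_equal_get_ss_elements2 : Prop := ∀ (dssp : String), Dom_get_ss_elements2 dssp → Pre_get_ss_elements2 dssp → Spec_get_ss_elements2 dssp (get_ss_elements2 dssp)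

-- ===== LEMMAS AND PROOFS =====

theorem aGroups_nil (o : Int) : aGroups o [] = [] := by simp [aGroups]

theorem bPair_cons2 (cs : List Char) (s e : Nat) (rest : List Nat) :
    bPair cs (s :: e :: rest) =
      (String.mk [cs.getD s ' '], (s : Int), (e : Int) - 1) :: bPair cs (e :: rest) := rfl

theorem bPair_one (cs : List Char) (s : Nat) : bPair cs [s] = [] := rfl

-- facts about a maximal run of c at the front of l
theorem run_spec (c : Char) (l : List Char) :
    (∀ j < (l.takeWhile (· == c)).length, l[j]? = some c) ∧
    ((l.takeWhile (· == c)).length < l.length → l[(l.takeWhile (· == c)).length]? ≠ some c) ∧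
    l.dropWhile (· == c) = l.drop (l.takeWhile (· == c)).length ∧
    (l.takeWhile (· == c)).length ≤ l.length := by
  induction l with
  | nil => simp
  | cons a l ih =>
    by_cases h : a = c
    · subst h
      obtain ⟨h1, h2, h3, h4⟩ := ih
      refine ⟨?_, ?_, ?_, ?_⟩ <;> simp
      · intro j hj
        cases j with
        | zero => simp
        | succ j => simpa using h1 j (by simpa using hj)
      · intro hlt
        simpa using h2 (by omega)
      · exact h3
      · omega
    · refine ⟨?_, ?_, ?_, ?_⟩ <;>
        simp [h]

-- the core invariant: the groupby pass from offset s over the suffix cs.drop s equals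
-- the pairing pass over boundary list s :: (change points > s) ++ [cs.length]
theorem main_inv (cs : List Char) (s : Nat) (hs : s < cs.length) :
    aGroups (s : Int) (cs.drop s) =
      bPair cs (s :: ((List.range' (s + 1) (cs.length - (s + 1))).filter
        (fun i => cs.getD i ' ' != cs.getD (i - 1) ' ') ++ [cs.length])) := by
  have hd : cs.drop s = cs[s] :: cs.drop (s + 1) := List.drop_eq_getElem_cons hs
  set c := cs[s] with hc
  set rest := cs.drop (s + 1) with hrest
  obtain ⟨h1, h2, h3, h4⟩ := run_spec c rest
  set k := (rest.takeWhile (· == c)).length with hk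
  have hrl : rest.length = cs.length - (s + 1) := by simp [hrest]
  have hkle : s + 1 + k ≤ cs.length := by omega
  -- getElem? facts transported to cs
  have hcs : cs[s]? = some c := List.getElem?_eq_getElem hs
  have hrun : ∀ j < k, cs[s + 1 + j]? = some c := by
    intro j hj
    have := h1 j hj
    rwa [hrest, List.getElem?_drop] at this
  have hgd : ∀ j < k, cs.getD (s + 1 + j) ' ' = c := by
    intro j hj; simp [List.getD_eq_getElem?_getD, hrun j hj]
  have hgds : cs.getD s ' ' = c := by simp [List.getD_eq_getElem?_getD, hcs]
  -- within the run there are no change points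
  have hfilt0 : (List.range' (s + 1) k).filter
      (fun i => cs.getD i ' ' != cs.getD (i - 1) ' ') = [] := by
    refine List.filter_eq_nil_iff.mpr ?_
    intro i hi
    have hmem : s + 1 ≤ i ∧ i < s + 1 + k := by
      constructor
      · exact (List.mem_range'_1.mp hi).1
      · exact (List.mem_range'_1.mp hi).2
    obtain ⟨hi1, hi2⟩ := hmem
    have hgi : cs.getD i ' ' = c := by
      have := hgd (i - (s + 1)) (by omega)
      rwa [show s + 1 + (i - (s + 1)) = i by omega] at this
    have hgi1 : cs.getD (i - 1) ' ' = c := by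
      rcases Nat.eq_or_lt_of_le hi1 with h | h
      · rw [show i - 1 = s by omega]; exact hgds
      · have := hgd (i - 1 - (s + 1)) (by omega)
        rwa [show s + 1 + (i - 1 - (s + 1)) = i - 1 by omega] at this
    rw [hgi, hgi1]
    simp
  -- getD at the last element of the run
  have hprev : cs.getD (s + k) ' ' = c := by
    rcases Nat.eq_zero_or_pos k with h0 | hpos
    · rw [h0]; simpa using hgds
    · have := hgd (k - 1) (by omega)
      rwa [show s + 1 + (k - 1) = s + k by omega] at this
  -- split the range at the end of the run
  have hsplit : List.range' (s + 1) (cs.length - (s + 1)) =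
      List.range' (s + 1) k ++ List.range' (s + 1 + k) (cs.length - (s + 1) - k) := by
    have h : List.range' (s + 1) k ++ List.range' (s + 1 + k) (cs.length - (s + 1) - k) =
        List.range' (s + 1) (k + (cs.length - (s + 1) - k)) := List.range'_append_1
    rw [show k + (cs.length - (s + 1) - k) = cs.length - (s + 1) by omega] at h
    exact h.symm
  -- drop past the run
  have hdrop : rest.dropWhile (· == c) = cs.drop (s + 1 + k) := by
    rw [h3, hrest, List.drop_drop]
  rw [hd]
  rw [aGroups]
  simp only [← hk]
  rw [hsplit, List.filter_append, hfilt0, List.nil_append, hdrop]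
  rcases Nat.eq_or_lt_of_le hkle with heq | hlt
  · -- the run reaches the end of the string: last segment
    have h0 : cs.length - (s + 1) - k = 0 := by omega
    rw [h0]
    simp only [List.range'_zero, List.filter_nil, List.nil_append]
    rw [show cs.drop (s + 1 + k) = [] from by rw [List.drop_eq_nil_iff]; omega]
    rw [aGroups_nil, bPair_cons2, bPair_one]
    simp only [hgds]
    have hlen : ((s : Int) + ((k : Int) + 1) - 1) = (cs.length : Int) - 1 := by omega
    rw [hlen]
  · -- a change point follows the run; recurse on the rest
    have hcp : (cs.getD (s + 1 + k) ' ' != cs.getD (s + 1 + k - 1) ' ') = true := by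
      have hklt : k < rest.length := by omega
      have hne := h2 hklt
      rw [hrest, List.getElem?_drop] at hne
      have hvsome : cs[s + 1 + k]? = some (cs[s + 1 + k]'(by omega)) :=
        List.getElem?_eq_getElem (by omega)
      have hvne : cs[s + 1 + k]'(by omega) ≠ c := fun h => hne (h ▸ hvsome)
      have hgd1 : cs.getD (s + 1 + k) ' ' = cs[s + 1 + k]'(by omega) := by
        simp [List.getD_eq_getElem?_getD, hvsome]
      rw [hgd1, show s + 1 + k - 1 = s + k by omega, hprev]
      simpa using hvne
    rw [show cs.length - (s + 1) - k = (cs.length - (s + 1) - k - 1) + 1 by omega,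
      List.range'_succ]
    rw [List.filter_cons, if_pos hcp, List.cons_append]
    rw [bPair_cons2]
    have hrec := main_inv cs (s + 1 + k) hlt
    rw [show cs.length - (s + 1 + k + 1) = cs.length - (s + 1) - k - 1 by omega] at hrec
    simp only [hgds]
    have hlen : ((s : Int) + ((k : Int) + 1) - 1) = ((s + 1 + k : Nat) : Int) - 1 := by
      push_cast; ring
    rw [hlen]
    have hoff : ((s : Int) + ((k : Int) + 1)) = ((s + 1 + k : Nat) : Int) := by
      push_cast; ring
    rw [hoff, hrec]
  termination_by cs.length - s
  decreasing_by omega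

-- ===== VERDICT (by name: the statement is the Claim_ definition above) =====
theorem get_ss_elements2_spec : Claim_equal_get_ss_elements2 := by
  intro dssp _ hpre
  unfold Spec_get_ss_elements2
  unfold Pre_get_ss_elements2 at hpre
  have hne : dssp.toList ≠ [] := by
    intro h; rw [h] at hpre; simp at hpre
  have hget : PySem.Str.pyGet? dssp 0 = some 'x' := by
    obtain ⟨t, ht⟩ : ∃ t, dssp.toList = 'x' :: t := by
      cases h : dssp.toList with
      | nil => exact absurd h hne
      | cons a t =>
        rw [h] at hpre; simp at hpre; exact ⟨t, by rw [hpre]⟩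
    simp [PySem.Str.pyGet?, PySem.List.pyGet?, PySem.List.pyIdx?, ht]
  rw [get_ss_elements2, get_ss_elements2_alt, hget]
  have h0 : 0 < dssp.toList.length := by
    cases h : dssp.toList with
    | nil => exact absurd h hne
    | cons a t => simp
  have := main_inv dssp.toList 0 h0
  rw [List.drop_zero] at this
  rw [show ((0 : Nat) : Int) = (0 : Int) by rfl] at this
  rw [this]
  rfl
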